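-- pv_equiv track=rewrite | github.com/echaussidon/kszx | kszx/tests/helpers.py | generate_indices
-- ===== SOURCE A (Python) =====
-- def generate_indices(shape):
--     if len(shape) == 1:
--         for i in range(shape[0]):
--             yield (i,)
--     else:
--         for t in generate_indices(shape[:-1]):
--             for i in range(shape[-1]):
--                 yield t + (i,)
-- ===== SOURCE B (Python) =====
-- def generate_indices(shape):
--     total = 1
--     for d in shape:
--         total *= d if d > 0 else 0
--     for k in range(total):
--         idx = []
--         for d in reversed(shape):
--             k, r = divmod(k, d)
--             idx.append(r)
--         yield tuple(reversed(idx))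
-- ===== Notes on version B (the rewrite author's own statement) =====
-- stated objective: alternative
-- what changed: Replaces A's recursion on shape[:-1] (nested generator delegation concatenating prefix tuples) with a closed-form rank decoding: compute total = product of positive-clamped dims once, then decode each rank k in range(total) by repeated divmod over the reversed shape.
import Mathlib
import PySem

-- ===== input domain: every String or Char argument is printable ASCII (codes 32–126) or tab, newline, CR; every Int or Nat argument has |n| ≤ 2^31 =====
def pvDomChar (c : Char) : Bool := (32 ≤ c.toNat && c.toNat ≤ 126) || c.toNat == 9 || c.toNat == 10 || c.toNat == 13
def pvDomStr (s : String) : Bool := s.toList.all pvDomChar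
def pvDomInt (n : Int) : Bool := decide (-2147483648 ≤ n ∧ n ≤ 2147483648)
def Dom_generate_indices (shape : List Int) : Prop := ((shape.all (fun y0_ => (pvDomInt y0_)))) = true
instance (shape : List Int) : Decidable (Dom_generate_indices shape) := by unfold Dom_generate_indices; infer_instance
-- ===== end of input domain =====

-- B replaces A's recursion on shape[:-1] (concatenating prefixes) by a closed-form rank
-- decoding: compute total = ∏ dims once and decode each k ∈ range(total) by repeated divmod
-- (objective: alternative). Equivalence is about the list of yielded tuples.

-- ===== PORT A =====
def generate_indices : List Int → List (List Int)
  | [] => []   -- Python recurses forever here (RecursionError); excluded by Pre_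
  | [n] => (PySem.List.pyRange 0 n 1).map (fun i => [i])
  | a :: b :: rest =>
      (generate_indices ((a :: b :: rest).dropLast)).flatMap
        (fun t => (PySem.List.pyRange 0 ((a :: b :: rest).getLast (by simp)) 1).map
          (fun i => t ++ [i]))
  termination_by l => l.length
  decreasing_by simp

-- ===== PORT B =====
-- inner loop: for d in reversed(shape): k, r = divmod(k, d); idx.append(r)
def pvDecodeLoop (k : Int) (rev : List Int) (idx : List Int) : Int × List Int :=
  match rev with
  | [] => (k, idx)
  | d :: rest => pvDecodeLoop (PySem.Int.floordiv k d) rest (idx ++ [PySem.Int.mod k d])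

def generate_indices_alt (shape : List Int) : List (List Int) :=
  let total := shape.foldl (fun acc d => acc * (if d > 0 then d else 0)) 1
  (PySem.List.pyRange 0 total 1).map (fun k => (pvDecodeLoop k shape.reverse []).2.reverse)

-- ===== PRECONDITION & SPEC =====
-- Pre_ excludes only the empty shape, on which Python's A recurses into RecursionError.
def Pre_generate_indices (shape : List Int) : Prop := shape ≠ []
instance (shape : List Int) : Decidable (Pre_generate_indices shape) := by
  unfold Pre_generate_indices; infer_instance
def pvWitness_generate_indices : List Int := [2, 3]

def Spec_generate_indices (shape : List Int) (out : List (List Int)) : Prop :=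
  out = generate_indices_alt shape
instance (shape : List Int) (out : List (List Int)) : Decidable (Spec_generate_indices shape out) := by
  unfold Spec_generate_indices; infer_instance

-- ===== CLAIM (what is proved, stated in full; the proofs are below) =====
def Claim_equal_generate_indices : Prop := ∀ (shape : List Int), Dom_generate_indices shape →
  Pre_generate_indices shape → Spec_generate_indices shape (generate_indices shape)

-- ===== LEMMAS AND PROOFS =====

theorem pvDecodeLoop_acc (k : Int) (rev idx : List Int) :
    pvDecodeLoop k rev idx = ((pvDecodeLoop k rev []).1, idx ++ (pvDecodeLoop k rev []).2) := by
  induction rev generalizing k idx with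
  | nil => simp [pvDecodeLoop]
  | cons d rest ih =>
      simp only [pvDecodeLoop]
      rw [ih (PySem.Int.floordiv k d) ([] ++ [PySem.Int.mod k d]),
          ih (PySem.Int.floordiv k d) (idx ++ [PySem.Int.mod k d])]
      simp

-- the tuple B decodes from rank k, as a function of shape (front-to-back)
def pvDecode (k : Int) (shape : List Int) : List Int :=
  (pvDecodeLoop k shape.reverse []).2.reverse

theorem pvDecode_nil (k : Int) : pvDecode k [] = [] := by simp [pvDecode, pvDecodeLoop]

theorem pvDecode_append (k : Int) (s : List Int) (n : Int) :
    pvDecode k (s ++ [n]) = pvDecode (PySem.Int.floordiv k n) s ++ [PySem.Int.mod k n] := by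
  simp only [pvDecode, List.reverse_append, List.reverse_cons, List.reverse_nil,
    List.nil_append, List.cons_append, pvDecodeLoop]
  rw [pvDecodeLoop_acc]
  simp

theorem pvTotal_eq (shape : List Int) (a : Int) :
    shape.foldl (fun acc d => acc * (if d > 0 then d else 0)) a
      = a * (shape.map (fun d => if d > 0 then d else 0)).prod := by
  induction shape generalizing a with
  | nil => simp
  | cons d rest ih =>
      simp only [List.foldl_cons, List.map_cons, List.prod_cons]
      rw [ih]; ring

theorem pvTotal_zero (shape : List Int) (d : Int) (hd : d ∈ shape) (hle : d ≤ 0) :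
    shape.foldl (fun acc d => acc * (if d > 0 then d else 0)) 1 = 0 := by
  rw [pvTotal_eq]
  have : (0 : Int) ∈ shape.map (fun d => if d > 0 then d else 0) := by
    exact List.mem_map.mpr ⟨d, hd, by simp [not_lt.mpr hle]⟩
  simp [List.prod_eq_zero this]

theorem pvTotal_pos (shape : List Int) (h : ∀ d ∈ shape, 0 < d) :
    shape.foldl (fun acc d => acc * (if d > 0 then d else 0)) 1 = shape.prod := by
  rw [pvTotal_eq]
  have : shape.map (fun d => if d > 0 then d else 0) = shape := by
    conv_rhs => rw [← List.map_id shape]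
    apply List.map_congr_left
    intro d hd; simp [h d hd]
  simp [this]

-- unfolding A on a shape of length ≥ 2, written as prefix ++ [last]
theorem genA_step (a : Int) (s : List Int) (n : Int) :
    generate_indices ((a :: s) ++ [n]) =
      (generate_indices (a :: s)).flatMap
        (fun t => (PySem.List.pyRange 0 n 1).map (fun i => t ++ [i])) := by
  obtain ⟨b, r', hbr⟩ : ∃ b r', s ++ [n] = b :: r' := by
    cases s with
    | nil => exact ⟨n, [], rfl⟩
    | cons x xs => exact ⟨x, xs ++ [n], by simp⟩
  have h1 : (a :: s) ++ [n] = a :: b :: r' := by simp [hbr]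
  rw [h1, generate_indices]
  have hdl : (a :: b :: r').dropLast = a :: s := by
    rw [← h1]
    exact List.dropLast_concat
  have hgl : (a :: b :: r').getLast (by simp) = n := by
    have h2 : (a :: b :: r').getLast? = some n := by
      rw [← h1]
      exact List.getLast?_concat
    simpa [List.getLast_eq_iff_getLast?_eq_some] using h2
  rw [hdl, hgl]

-- A yields nothing as soon as some dimension is ≤ 0
theorem genA_zero (shape : List Int) (hne : shape ≠ [])
    (h : ∃ d ∈ shape, d ≤ 0) : generate_indices shape = [] := by
  induction shape using List.reverseRecOn with
  | nil => exact absurd rfl hne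
  | append_singleton s n ih =>
      obtain ⟨d, hd, hle⟩ := h
      cases s with
      | nil =>
          simp only [List.mem_singleton, List.nil_append] at hd ⊢
          subst hd
          simp [generate_indices, PySem.List.pyRange_one_eq_nil hle]
      | cons a rest =>
          rw [genA_step]
          rcases List.mem_append.mp hd with hd | hd
          · rw [ih (by simp) ⟨d, hd, hle⟩]; simp
          · simp only [List.mem_singleton] at hd; subst hd
            rw [PySem.List.pyRange_one_eq_nil hle]
            simp

-- splitting range(T*n) into range(T) × range(n), on naturals
theorem pvRangeMul (T n : Nat) :
    List.range (T * n) = (List.range T).flatMap (fun q => (List.range n).map (fun r => q * n + r)) := by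
  induction T with
  | zero => simp
  | succ T ih =>
      rw [Nat.succ_mul, List.range_add, ih, List.range_succ]
      simp [List.flatMap_append, List.range_eq_range']

-- the same on pyRange with Int bounds
theorem pvPyRangeMul (T n : Int) (hT : 0 ≤ T) (hn : 0 ≤ n) :
    PySem.List.pyRange 0 (T * n) 1
      = (PySem.List.pyRange 0 T 1).flatMap
          (fun q => (PySem.List.pyRange 0 n 1).map (fun r => q * n + r)) := by
  rw [PySem.List.pyRange_one, PySem.List.pyRange_one, PySem.List.pyRange_one]
  simp only [sub_zero, zero_add]
  rw [Int.toNat_mul hT hn, pvRangeMul, List.map_flatMap, List.flatMap_map]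
  apply List.flatMap_congr
  intro q hq
  simp only [List.map_map]
  apply List.map_congr_left
  intro r hr
  simp only [Function.comp]
  push_cast [Int.toNat_of_nonneg hn]
  ring

-- main equivalence on all-positive shapes
theorem genA_pos (shape : List Int) (hne : shape ≠ []) (hpos : ∀ d ∈ shape, 0 < d) :
    generate_indices shape
      = (PySem.List.pyRange 0 shape.prod 1).map (fun k => pvDecode k shape) := by
  induction shape using List.reverseRecOn with
  | nil => exact absurd rfl hne
  | append_singleton s n ih =>
      have hn : 0 < n := hpos n (by simp)
      cases s with
      | nil =>
          simp only [List.nil_append, generate_indices, List.prod_cons, List.prod_nil, mul_one]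
          apply List.map_congr_left
          intro k hk
          rw [PySem.List.mem_pyRange_one] at hk
          have hdec : pvDecode k [n] = [PySem.Int.mod k n] := by
            simpa [pvDecode_nil] using pvDecode_append k [] n
          rw [hdec, PySem.Int.mod_eq_emod_of_pos hn, Int.emod_eq_of_lt hk.1 hk.2]
      | cons a rest =>
          have hs : (a :: rest) ≠ [] := by simp
          have hspos : ∀ d ∈ (a :: rest), 0 < d := fun d hd =>
            hpos d (by rcases List.mem_cons.mp hd with h | h <;> simp [h])
          have hT : 0 < (a :: rest).prod := List.prod_pos hspos
          rw [genA_step, ih hs hspos]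
          have hprod : ((a :: rest) ++ [n]).prod = (a :: rest).prod * n := by
            simp [mul_assoc]
          rw [hprod, pvPyRangeMul _ _ (le_of_lt hT) (le_of_lt hn)]
          rw [List.flatMap_map, List.map_flatMap]
          apply List.flatMap_congr
          intro q hq
          rw [List.map_map]
          apply List.map_congr_left
          intro r hr
          rw [PySem.List.mem_pyRange_one] at hr
          simp only [Function.comp]
          rw [pvDecode_append]
          have hdiv : PySem.Int.floordiv (q * n + r) n = q := by
            rw [PySem.Int.floordiv_eq_ediv_of_pos hn, add_comm,
              Int.add_mul_ediv_right _ _ (ne_of_gt hn), Int.ediv_eq_zero_of_lt hr.1 hr.2]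
            ring
          have hmod : PySem.Int.mod (q * n + r) n = r := by
            rw [PySem.Int.mod_eq_emod_of_pos hn, add_comm, Int.add_mul_emod_self_right]
            exact Int.emod_eq_of_lt hr.1 hr.2
          rw [hdiv, hmod]

-- ===== VERDICT (by name: the statement is the Claim_ definition above) =====
theorem generate_indices_spec : Claim_equal_generate_indices := by
  intro shape _ hpre
  unfold Spec_generate_indices generate_indices_alt
  by_cases hall : ∀ d ∈ shape, 0 < d
  · simp only [pvTotal_pos shape hall]
    exact genA_pos shape hpre hall
  · push Not at hall
    obtain ⟨d, hd, hle⟩ := hall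
    simp only [pvTotal_zero shape d hd hle]
    rw [genA_zero shape hpre ⟨d, hd, hle⟩]
    simp [PySem.List.pyRange_one_eq_nil]
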